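-- pv_equiv track=rewrite | github.com/AlderSan/AOC2025 | Day 10/main.py | press_buttons_joltage
-- ===== SOURCE A (Python) =====
-- def press_buttons_joltage(start_joltage: list[int], list_of_button_presses: list[str]) -> list[int]:
--     current_joltage = start_joltage[:]
--     press_calc = [0] * len(start_joltage)
--     for button_press in list_of_button_presses:
--         for i in range(0, len(press_calc)):
--             if str(i) in button_press:
--                 press_calc[i] += 1
--     for i in range(0, len(press_calc)):
--         current_joltage[i] -= press_calc[i]
--     return current_joltage
-- ===== SOURCE B (Python) =====
-- def press_buttons_joltage(start_joltage: list[int], list_of_button_presses: list[str]) -> list[int]: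
--     n = len(start_joltage)
--     table = {}
--     for k in range(n):
--         table[str(k)] = k
--     result = list(start_joltage)
--     for button in list_of_button_presses:
--         hits = set()
--         for a in range(len(button)):
--             for b in range(a + 1, len(button) + 1):
--                 k = table.get(button[a:b])
--                 if k is not None:
--                     hits.add(k)
--         for k in hits:
--             result[k] -= 1
--     return result
-- ===== Notes on version B (the rewrite author's own statement) =====
-- stated objective: faster
-- what changed: A scans every index i per button and runs a substring search str(i) in button each time (O(len(start)*|button|) per button); B builds a str(k)->k dictionary once and, per button, enumerates the button's substrings and looks them up, collecting the hit indices in a set, so the per-button cost no longer depends on len(start).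
import Mathlib
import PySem

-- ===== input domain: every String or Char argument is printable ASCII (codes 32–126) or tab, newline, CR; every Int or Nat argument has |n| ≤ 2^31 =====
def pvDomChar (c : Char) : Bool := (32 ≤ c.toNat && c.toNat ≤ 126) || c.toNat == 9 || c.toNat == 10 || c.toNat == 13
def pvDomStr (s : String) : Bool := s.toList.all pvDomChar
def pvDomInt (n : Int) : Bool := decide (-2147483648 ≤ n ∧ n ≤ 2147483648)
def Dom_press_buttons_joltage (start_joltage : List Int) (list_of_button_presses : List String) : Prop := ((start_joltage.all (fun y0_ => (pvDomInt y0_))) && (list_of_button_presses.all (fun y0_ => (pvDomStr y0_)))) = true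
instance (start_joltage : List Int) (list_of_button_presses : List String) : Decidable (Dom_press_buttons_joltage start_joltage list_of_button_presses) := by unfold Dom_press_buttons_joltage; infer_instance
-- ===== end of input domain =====

-- B replaces A's per-button scan over all indices (a substring search per index) by a
-- precomputed table str(k) -> k and a per-button enumeration of its substrings; objective: faster for long joltage lists.

-- ===== PORT A =====
-- inner loop of A: for i in range(0, len(press_calc)): if str(i) in button_press: press_calc[i] += 1
-- (i comes from range(0, len), so i ≥ 0 and Int.toNat is exact here)
def pvInnerA (press_calc : List Int) (button_press : String) : List Int :=
  (PySem.List.pyRange 0 (press_calc.length : Int)).foldl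
    (fun pc i =>
      if PySem.Str.isIn (PySem.Int.toStr i) button_press then pc.modify i.toNat (fun v => v + 1) else pc)
    press_calc

def press_buttons_joltage (start_joltage : List Int) (list_of_button_presses : List String) : List Int :=
  let current_joltage := start_joltage                               -- start_joltage[:]
  let press_calc : List Int := List.replicate start_joltage.length 0
  let press_calc := list_of_button_presses.foldl pvInnerA press_calc
  -- for i in range(0, len(press_calc)): current_joltage[i] -= press_calc[i]
  (PySem.List.pyRange 0 (press_calc.length : Int)).foldl
    (fun cj i => cj.modify i.toNat (fun v => v - PySem.List.pyGetD press_calc i 0))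
    current_joltage

-- ===== PORT B =====
-- table = {}; for k in range(n): table[str(k)] = k
def pvTable (n : Nat) : PySem.Dict String Int :=
  (PySem.List.pyRange 0 (n : Int)).foldl
    (fun d k => d.insert (PySem.Int.toStr k) k) PySem.Dict.empty

-- hits = set(); for a in range(len(button)): for b in range(a+1, len(button)+1):
--   k = table.get(button[a:b]);  if k is not None: hits.add(k)
def pvHits (table : PySem.Dict String Int) (button : String) : PySem.Set Int :=
  (PySem.List.pyRange 0 (PySem.Str.len button)).foldl
    (fun hits a =>
      (PySem.List.pyRange (a + 1) (PySem.Str.len button + 1)).foldl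
        (fun hits b =>
          match table.get? (PySem.Str.slice button (some a) (some b)) with
          | some k => hits.add k
          | none => hits)
        hits)
    PySem.Set.empty

def press_buttons_joltage_alt (start_joltage : List Int) (list_of_button_presses : List String) : List Int :=
  let table := pvTable start_joltage.length
  list_of_button_presses.foldl
    (fun result button =>
      -- for k in hits: result[k] -= 1   (k ≥ 0 by construction, so Int.toNat is exact)
      (pvHits table button).foldl (fun res k => res.modify k.toNat (fun v => v - 1)) result)
    start_joltage

-- ===== PRECONDITION & SPEC =====
def Spec_press_buttons_joltage (start_joltage : List Int) (list_of_button_presses : List String) (out : List Int) : Prop := out = press_buttons_joltage_alt start_joltage list_of_button_presses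
instance (start_joltage : List Int) (list_of_button_presses : List String) (out : List Int) : Decidable (Spec_press_buttons_joltage start_joltage list_of_button_presses out) := by unfold Spec_press_buttons_joltage; infer_instance

-- ===== CLAIM (what is proved, stated in full; the proofs are below) =====
def Claim_equal_press_buttons_joltage : Prop := ∀ (start_joltage : List Int) (list_of_button_presses : List String), Dom_press_buttons_joltage start_joltage list_of_button_presses → Spec_press_buttons_joltage start_joltage list_of_button_presses (press_buttons_joltage start_joltage list_of_button_presses)

-- ===== LEMMAS AND PROOFS =====

/- ## Decimal digits: `Nat.toDigits 10` is injective (needed for the str(k) → k table) -/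

def chVal (c : Char) : Nat := c.toNat - 48
def valNat (cs : List Char) : Nat := cs.foldl (fun a c => a * 10 + chVal c) 0

def myDigits (n : Nat) : List Char :=
  if h : n / 10 = 0 then [Nat.digitChar (n % 10)]
  else myDigits (n / 10) ++ [Nat.digitChar (n % 10)]
decreasing_by exact Nat.div_lt_self (by omega) (by omega)

lemma toDigitsCore_eq : ∀ (f n : Nat) (ds : List Char), n < f →
    Nat.toDigitsCore 10 f n ds = myDigits n ++ ds := by
  intro f
  induction f with
  | zero => intro n ds h; omega
  | succ f ih =>
    intro n ds h
    rw [Nat.toDigitsCore]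
    by_cases h0 : n / 10 = 0
    · simp [h0, myDigits]
    · have h1 : n / 10 < f := by
        have := Nat.div_lt_self (by omega : 0 < n) (by omega : 1 < 10)
        omega
      simp only [h0, if_false, ih _ _ h1]
      conv_rhs => rw [myDigits]
      simp [h0]

lemma toDigits_eq (n : Nat) : Nat.toDigits 10 n = myDigits n := by
  rw [Nat.toDigits, toDigitsCore_eq (n+1) n [] (by omega), List.append_nil]

lemma chVal_digitChar (d : Nat) (h : d < 10) : chVal (Nat.digitChar d) = d := by
  interval_cases d <;> decide

lemma valNat_append (xs : List Char) (c : Char) :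
    valNat (xs ++ [c]) = valNat xs * 10 + chVal c := by
  simp [valNat, List.foldl_append]

lemma valNat_myDigits (n : Nat) : valNat (myDigits n) = n := by
  induction n using Nat.strong_induction_on with
  | _ n ih =>
    rw [myDigits]
    by_cases h0 : n / 10 = 0
    · simp [h0, valNat, chVal_digitChar (n % 10) (by omega)]
      omega
    · rw [dif_neg h0, valNat_append, chVal_digitChar (n % 10) (by omega),
        ih (n / 10) (Nat.div_lt_self (by omega) (by omega))]
      omega

lemma myDigits_ne_nil (n : Nat) : myDigits n ≠ [] := by
  rw [myDigits]; by_cases h0 : n / 10 = 0 <;> simp [h0]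

lemma toCharsNat (k : Nat) : PySem.Int.toChars (k : Int) = myDigits k := by
  simp [PySem.Int.toChars, toDigits_eq]

lemma toStrNat_inj {a b : Nat} (h : PySem.Int.toStr (a : Int) = PySem.Int.toStr (b : Int)) : a = b := by
  have h2 : PySem.Int.toChars (a : Int) = PySem.Int.toChars (b : Int) := by
    rw [← PySem.Int.toList_toStr, ← PySem.Int.toList_toStr, h]
  rw [toCharsNat, toCharsNat] at h2
  have h3 := congrArg valNat h2
  rwa [valNat_myDigits, valNat_myDigits] at h3

/- ## The table {str(k): k for k in range(n)} -/

lemma pvTable_succ (n : Nat) :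
    pvTable (n + 1) = (pvTable n).insert (PySem.Int.toStr (n : Int)) (n : Int) := by
  unfold pvTable
  push_cast
  rw [PySem.List.pyRange_one_append 0 (n : Int) ((n : Int) + 1) (by omega) (by omega),
    PySem.List.pyRange_one_cons (by omega : (n : Int) < (n : Int) + 1)]
  simp [List.foldl_append]

lemma pvTable_get_lt (n k : Nat) (h : k < n) :
    (pvTable n).get? (PySem.Int.toStr (k : Int)) = some (k : Int) := by
  induction n with
  | zero => omega
  | succ n ih =>
    rw [pvTable_succ]
    by_cases hk : k = n
    · subst hk; exact PySem.Dict.get?_insert_self _ _ _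
    · rw [PySem.Dict.get?_insert_of_ne _ _ (fun he => hk (toStrNat_inj he))]
      exact ih (by omega)

lemma pvTable_get_some (n : Nat) (s : String) (x : Int)
    (h : (pvTable n).get? s = some x) :
    ∃ k : Nat, k < n ∧ x = (k : Int) ∧ PySem.Int.toStr (k : Int) = s := by
  induction n with
  | zero =>
    simp [pvTable, PySem.List.pyRange_one_eq_nil, PySem.Dict.get?_empty] at h
  | succ n ih =>
    rw [pvTable_succ] at h
    by_cases hs : s = PySem.Int.toStr (n : Int)
    · subst hs
      rw [PySem.Dict.get?_insert_self] at h
      exact ⟨n, by omega, by simpa using h.symm, rfl⟩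
    · rw [PySem.Dict.get?_insert_of_ne _ _ hs] at h
      obtain ⟨k, hk, hx, hsk⟩ := ih h
      exact ⟨k, by omega, hx, hsk⟩

/- ## Membership in pvHits -/

lemma mem_inner_fold (tbl : PySem.Dict String Int) (bt : String) (a : Int) :
    ∀ (bs : List Int) (s : PySem.Set Int) (x : Int),
      (x ∈ bs.foldl (fun hits b =>
          match tbl.get? (PySem.Str.slice bt (some a) (some b)) with
          | some k => hits.add k
          | none => hits) s) ↔
      x ∈ s ∨ ∃ b ∈ bs, tbl.get? (PySem.Str.slice bt (some a) (some b)) = some x := by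
  intro bs
  induction bs with
  | nil => simp
  | cons b bs ih =>
    intro s x
    simp only [List.foldl_cons]
    cases hg : tbl.get? (PySem.Str.slice bt (some a) (some b)) with
    | none => simp [hg, ih]
    | some k =>
      simp [hg, ih, PySem.Set.mem_add]
      constructor
      · rintro (⟨h | h⟩ | h)
        · exact Or.inl h
        · exact Or.inr (Or.inl h.symm)
        · exact Or.inr (Or.inr h)
      · rintro (h | h | h)
        · exact Or.inl (Or.inl h)
        · exact Or.inl (Or.inr h.symm)
        · exact Or.inr h

lemma nodup_inner_fold (tbl : PySem.Dict String Int) (bt : String) (a : Int) :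
    ∀ (bs : List Int) (s : PySem.Set Int), s.Nodup →
      (bs.foldl (fun hits b =>
          match tbl.get? (PySem.Str.slice bt (some a) (some b)) with
          | some k => hits.add k
          | none => hits) s).Nodup := by
  intro bs
  induction bs with
  | nil => intro s hs; exact hs
  | cons b bs ih =>
    intro s hs
    simp only [List.foldl_cons]
    cases hg : tbl.get? (PySem.Str.slice bt (some a) (some b)) with
    | none => exact ih s hs
    | some k => exact ih _ (PySem.Set.nodup_add s k hs)

lemma mem_pvHits_raw (tbl : PySem.Dict String Int) (bt : String) (x : Int) :
    x ∈ pvHits tbl bt ↔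
      ∃ a ∈ PySem.List.pyRange 0 (PySem.Str.len bt),
        ∃ b ∈ PySem.List.pyRange (a + 1) (PySem.Str.len bt + 1),
          tbl.get? (PySem.Str.slice bt (some a) (some b)) = some x := by
  unfold pvHits
  generalize PySem.List.pyRange 0 (PySem.Str.len bt) = as
  have key : ∀ (l : List Int) (s : PySem.Set Int),
      (x ∈ l.foldl (fun hits a =>
          (PySem.List.pyRange (a + 1) (PySem.Str.len bt + 1)).foldl
            (fun hits b =>
              match tbl.get? (PySem.Str.slice bt (some a) (some b)) with
              | some k => hits.add k
              | none => hits) hits) s) ↔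
      x ∈ s ∨ ∃ a ∈ l, ∃ b ∈ PySem.List.pyRange (a + 1) (PySem.Str.len bt + 1),
          tbl.get? (PySem.Str.slice bt (some a) (some b)) = some x := by
    intro l
    induction l with
    | nil => simp
    | cons a l ih =>
      intro s
      simp only [List.foldl_cons]
      rw [ih, mem_inner_fold]
      constructor
      · rintro ((h | ⟨b, hb, hg⟩) | ⟨a', ha', b, hb, hg⟩)
        · exact Or.inl h
        · exact Or.inr ⟨a, List.mem_cons_self .., b, hb, hg⟩
        · exact Or.inr ⟨a', List.mem_cons_of_mem _ ha', b, hb, hg⟩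
      · rintro (h | ⟨a', ha', b, hb, hg⟩)
        · exact Or.inl (Or.inl h)
        · rcases List.mem_cons.1 ha' with rfl | ha'
          · exact Or.inl (Or.inr ⟨b, hb, hg⟩)
          · exact Or.inr ⟨a', ha', b, hb, hg⟩
  rw [key]
  simp [PySem.Set.empty]

lemma nodup_pvHits (tbl : PySem.Dict String Int) (bt : String) : (pvHits tbl bt).Nodup := by
  unfold pvHits
  generalize PySem.List.pyRange 0 (PySem.Str.len bt) = as
  have key : ∀ (l : List Int) (s : PySem.Set Int), s.Nodup →
      (l.foldl (fun hits a =>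
          (PySem.List.pyRange (a + 1) (PySem.Str.len bt + 1)).foldl
            (fun hits b =>
              match tbl.get? (PySem.Str.slice bt (some a) (some b)) with
              | some k => hits.add k
              | none => hits) hits) s).Nodup := by
    intro l
    induction l with
    | nil => intro s hs; exact hs
    | cons a l ih => intro s hs; exact ih _ (nodup_inner_fold tbl bt a _ s hs)
  exact key as PySem.Set.empty (by simp [PySem.Set.empty])

lemma take_drop_infix {α : Type} (l : List α) (a m : Nat) :
    List.take m (List.drop a l) <:+: l :=
  List.infix_iff_prefix_suffix.2 ⟨List.drop a l, List.take_prefix _ _, List.drop_suffix _ _⟩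

-- main characterisation: for the real table, pvHits holds exactly the in-range k with str(k) a substring
lemma mem_pvHits_iff (n : Nat) (bt : String) (x : Int) :
    x ∈ pvHits (pvTable n) bt ↔
      ∃ k : Nat, k < n ∧ x = (k : Int) ∧ PySem.Int.toChars (k : Int) <:+: bt.toList := by
  rw [mem_pvHits_raw]
  constructor
  · rintro ⟨a, ha, b, hb, hg⟩
    obtain ⟨k, hkn, hx, hs⟩ := pvTable_get_some n _ x hg
    refine ⟨k, hkn, hx, ?_⟩
    have ha0 : 0 ≤ a := (PySem.List.mem_pyRange_one.1 ha).1
    have hb0 : 0 ≤ b := by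
      have := (PySem.List.mem_pyRange_one.1 hb).1; omega
    have : PySem.Int.toChars (k : Int) = List.take (b.toNat - a.toNat) (List.drop a.toNat bt.toList) := by
      rw [← PySem.Int.toList_toStr, hs, PySem.Str.toList_slice,
        PySem.Chars.slice_eq_listSlice, PySem.List.slice_toNat bt.toList ha0 hb0]
    rw [this]
    exact take_drop_infix _ _ _
  · rintro ⟨k, hkn, hx, hinf⟩
    obtain ⟨p, q, hpq⟩ := hinf
    have hdnil : PySem.Int.toChars (k : Int) ≠ [] := by
      rw [toCharsNat]; exact myDigits_ne_nil k
    have hdlen : 1 ≤ (PySem.Int.toChars (k : Int)).length := by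
      cases hne : PySem.Int.toChars (k : Int) with
      | nil => exact absurd hne hdnil
      | cons c cs => simp
    have hlen : bt.toList.length = p.length + (PySem.Int.toChars (k : Int)).length + q.length := by
      rw [← hpq]; simp; omega
    have hslice : PySem.Str.slice bt (some (p.length : Int))
        (some ((p.length : Int) + ((PySem.Int.toChars (k : Int)).length : Int))) = PySem.Int.toStr (k : Int) := by
      rw [← String.toList_inj, PySem.Str.toList_slice, PySem.Chars.slice_eq_listSlice,
        PySem.Int.toList_toStr]
      have : ((p.length : Int) + ((PySem.Int.toChars (k : Int)).length : Int)) =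
          ((p.length + (PySem.Int.toChars (k : Int)).length : Nat) : Int) := by push_cast; ring
      rw [this, PySem.List.slice_natCast, ← hpq]
      rw [List.append_assoc, List.drop_left, Nat.add_sub_cancel_left, List.take_left]
    refine ⟨(p.length : Int), ?_, (p.length : Int) + ((PySem.Int.toChars (k : Int)).length : Int), ?_, ?_⟩
    · rw [PySem.List.mem_pyRange_one, PySem.Str.len_eq]
      constructor
      · omega
      · rw [hlen]; push_cast; omega
    · rw [PySem.List.mem_pyRange_one, PySem.Str.len_eq]
      constructor
      · omega
      · rw [hlen]; push_cast; omega
    · rw [hslice, hx]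
      exact pvTable_get_lt n k hkn

lemma nonneg_of_mem_pvHits (n : Nat) (bt : String) (x : Int) (h : x ∈ pvHits (pvTable n) bt) :
    0 ≤ x := by
  obtain ⟨k, _, hx, _⟩ := (mem_pvHits_iff n bt x).1 h
  omega

/- ## Generic fold-of-modify lemma -/

lemma foldl_modify_getElem? (g : Int → Int → Int) (P : Int → Bool) :
    ∀ (l : List Int) (r : List Int) (j : Nat), l.Nodup → (∀ i ∈ l, 0 ≤ i) →
      (l.foldl (fun r i => if P i then r.modify i.toNat (g i) else r) r)[j]? =
      if (j : Int) ∈ l ∧ P (j : Int) then r[j]?.map (g (j : Int)) else r[j]? := by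
  intro l
  induction l with
  | nil => simp
  | cons i l ih =>
    intro r j hnd hnn
    have hinl : i ∉ l := (List.nodup_cons.1 hnd).1
    have hi0 : 0 ≤ i := hnn i (List.mem_cons_self ..)
    simp only [List.foldl_cons]
    rw [ih _ j (List.nodup_cons.1 hnd).2 (fun x hx => hnn x (List.mem_cons_of_mem _ hx))]
    have hstep : (if P i = true then r.modify i.toNat (g i) else r)[j]? =
        if ((j : Int) = i ∧ P i = true) then r[j]?.map (g i) else r[j]? := by
      by_cases hP : P i
      · simp only [if_pos hP, List.getElem?_modify]
        by_cases hij : (j : Int) = i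
        · have ht : i.toNat = j := by omega
          cases r[j]? <;> simp [ht, hij, hP]
        · have ht : i.toNat ≠ j := by omega
          cases r[j]? <;> simp [ht, hij]
      · simp [hP]
    rw [hstep]
    by_cases hij : (j : Int) = i
    · subst hij
      have hjm : (j : Int) ∉ l := hinl
      by_cases hP : P (j : Int) <;> simp [hjm, hP]
    · simp [List.mem_cons, hij]

/- ## A-side characterisation -/

lemma pvInnerA_getElem? (pc : List Int) (bp : String) (j : Nat) :
    (pvInnerA pc bp)[j]? =
      pc[j]?.map (fun v => v + if PySem.Str.isIn (PySem.Int.toStr (j : Int)) bp then 1 else 0) := by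
  unfold pvInnerA
  rw [foldl_modify_getElem? (fun _ v => v + 1)
      (fun i => PySem.Str.isIn (PySem.Int.toStr i) bp) _ pc j
      (PySem.List.nodup_pyRange_one 0 _)
      (fun x hx => (PySem.List.mem_pyRange_one.1 hx).1)]
  by_cases hj : j < pc.length
  · have hm : (j : Int) ∈ PySem.List.pyRange 0 (pc.length : Int) := by
      rw [PySem.List.mem_pyRange_one]; omega
    by_cases hP : PySem.Str.isIn (PySem.Int.toStr (j : Int)) bp
    · rw [if_pos ⟨hm, hP⟩]
      simp only [hP, if_true]
    · have hPf : PySem.Str.isIn (PySem.Int.toStr (j : Int)) bp = false := by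
        revert hP; cases PySem.Str.isIn (PySem.Int.toStr (j : Int)) bp <;> simp
      have hPf' : PySem.Chars.isIn (PySem.Int.toChars (j : Int)) bp.toList = false := by
        simpa using hPf
      rw [if_neg (fun hc => hP hc.2)]
      cases hx : pc[j]? <;> simp [hPf']
  · have hm : (j : Int) ∉ PySem.List.pyRange 0 (pc.length : Int) := by
      rw [PySem.List.mem_pyRange_one]; omega
    rw [if_neg (fun hc => hm hc.1), List.getElem?_eq_none (by omega)]
    simp

lemma pvInnerA_length (pc : List Int) (bp : String) : (pvInnerA pc bp).length = pc.length := by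
  unfold pvInnerA
  generalize PySem.List.pyRange 0 (pc.length : Int) = l
  induction l generalizing pc with
  | nil => rfl
  | cons i l ih =>
    simp only [List.foldl_cons]
    by_cases hP : PySem.Str.isIn (PySem.Int.toStr i) bp
    · rw [if_pos hP, ih]; simp
    · rw [if_neg hP, ih]

lemma foldA_length (presses : List String) :
    ∀ pc : List Int, (presses.foldl pvInnerA pc).length = pc.length := by
  induction presses with
  | nil => intro pc; rfl
  | cons bp presses ih => intro pc; rw [List.foldl_cons, ih, pvInnerA_length]

lemma foldA_getElem? (presses : List String) :
    ∀ (pc : List Int) (j : Nat),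
      (presses.foldl pvInnerA pc)[j]? =
      pc[j]?.map (fun v => v +
        (presses.countP (fun bp => PySem.Str.isIn (PySem.Int.toStr (j : Int)) bp) : Int)) := by
  induction presses with
  | nil => intro pc j; cases hx : pc[j]? <;> simp [hx]
  | cons bp presses ih =>
    intro pc j
    rw [List.foldl_cons, ih, pvInnerA_getElem?, List.countP_cons]
    cases hx : pc[j]? with
    | none => simp
    | some v =>
      simp only [Option.map_some]
      by_cases hP : PySem.Chars.isIn (PySem.Int.toChars (j : Int)) bp.toList
      · simp [hP]; ring
      · simp [hP]

/- ## B-side characterisation -/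

lemma subtract_fold_getElem? (hits : List Int) (hnd : hits.Nodup) (hnn : ∀ k ∈ hits, 0 ≤ k)
    (res : List Int) (j : Nat) :
    (hits.foldl (fun res k => res.modify k.toNat (fun v => v - 1)) res)[j]? =
      res[j]?.map (fun v => v - if (j : Int) ∈ hits then 1 else 0) := by
  have hcong : hits.foldl (fun res k => res.modify k.toNat (fun v => v - 1)) res =
      hits.foldl (fun r i => if (fun _ : Int => true) i then r.modify i.toNat ((fun _ v => v - 1) i) else r) res := by
    simp
  rw [hcong, foldl_modify_getElem? (fun _ v => v - 1) (fun _ => true) hits res j hnd hnn]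
  by_cases hm : (j : Int) ∈ hits
  · simp [hm]
  · simp only [hm, false_and, if_false]
    cases res[j]? <;> simp

lemma foldB_getElem? (n : Nat) (presses : List String) :
    ∀ (res : List Int) (j : Nat),
      (presses.foldl (fun result button =>
          (pvHits (pvTable n) button).foldl
            (fun res k => res.modify k.toNat (fun v => v - 1)) result) res)[j]? =
      res[j]?.map (fun v => v -
        (presses.countP (fun bt => decide ((j : Int) ∈ pvHits (pvTable n) bt)) : Int)) := by
  induction presses with
  | nil => intro res j; cases hx : res[j]? <;> simp [hx]
  | cons bt presses ih =>
    intro res j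
    rw [List.foldl_cons, ih,
      subtract_fold_getElem? _ (nodup_pvHits _ _) (fun k hk => nonneg_of_mem_pvHits n bt k hk),
      List.countP_cons]
    cases hx : res[j]? with
    | none => simp
    | some v =>
      simp only [Option.map_some]
      by_cases hm : (j : Int) ∈ pvHits (pvTable n) bt
      · simp [hm]; ring
      · simp [hm]

/- ## The two per-index counts agree -/

lemma count_eq (n : Nat) (presses : List String) (j : Nat) (hj : j < n) :
    presses.countP (fun bp => PySem.Str.isIn (PySem.Int.toStr (j : Int)) bp) =
    presses.countP (fun bt => decide ((j : Int) ∈ pvHits (pvTable n) bt)) := by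
  apply List.countP_congr
  intro bp _
  simp only [decide_eq_true_eq]
  rw [PySem.Str.isIn_iff_infix, PySem.Int.toList_toStr, mem_pvHits_iff]
  constructor
  · intro h; exact ⟨j, hj, rfl, h⟩
  · rintro ⟨k, _, hk, h⟩
    have : j = k := by omega
    subst this; exact h

-- ===== VERDICT (by name: the statement is the Claim_ definition above) =====
theorem press_buttons_joltage_spec : Claim_equal_press_buttons_joltage := by
  intro start presses _dom
  unfold Spec_press_buttons_joltage press_buttons_joltage press_buttons_joltage_alt
  apply List.ext_getElem?
  intro j
  set n := start.length with hn
  set pcs := presses.foldl pvInnerA (List.replicate n (0 : Int)) with hpcs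
  have hpcslen : pcs.length = n := by
    rw [hpcs, foldA_length]; simp
  -- A side
  have hA : ((PySem.List.pyRange 0 (pcs.length : Int)).foldl
      (fun cj i => cj.modify i.toNat (fun v => v - PySem.List.pyGetD pcs i 0)) start)[j]? =
      start[j]?.map (fun v => v -
        (presses.countP (fun bp => PySem.Str.isIn (PySem.Int.toStr (j : Int)) bp) : Int)) := by
    have hcong : (PySem.List.pyRange 0 (pcs.length : Int)).foldl
        (fun cj i => cj.modify i.toNat (fun v => v - PySem.List.pyGetD pcs i 0)) start =
        (PySem.List.pyRange 0 (pcs.length : Int)).foldl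
        (fun r i => if (fun _ : Int => true) i
          then r.modify i.toNat ((fun i v => v - PySem.List.pyGetD pcs i 0) i) else r) start := by
      simp
    rw [hcong, foldl_modify_getElem? _ _ _ start j (PySem.List.nodup_pyRange_one 0 _)
        (fun x hx => (PySem.List.mem_pyRange_one.1 hx).1)]
    by_cases hj : j < n
    · have hm : (j : Int) ∈ PySem.List.pyRange 0 (pcs.length : Int) := by
        rw [PySem.List.mem_pyRange_one]; omega
      simp only [hm, true_and, if_pos]
      have hpc : pcs[j]? = some ((presses.countP
          (fun bp => PySem.Str.isIn (PySem.Int.toStr (j : Int)) bp) : Int)) := by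
        rw [hpcs, foldA_getElem?]
        rw [List.getElem?_replicate]
        simp [hj]
      have : PySem.List.pyGetD pcs (j : Int) 0 =
          (presses.countP (fun bp => PySem.Str.isIn (PySem.Int.toStr (j : Int)) bp) : Int) := by
        rw [PySem.List.pyGetD_natCast, List.getD_eq_getElem?_getD, hpc]
        rfl
      rw [this]
    · have hm : (j : Int) ∉ PySem.List.pyRange 0 (pcs.length : Int) := by
        rw [PySem.List.mem_pyRange_one]; omega
      rw [List.getElem?_eq_none (by omega)]
      simp [hm]
  -- B side
  have hB := foldB_getElem? n presses start j
  rw [hA, hB]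
  by_cases hj : j < n
  · rw [count_eq n presses j hj]
  · rw [List.getElem?_eq_none (by omega)]
    simp
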